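-- pv_equiv track=rewrite | github.com/project-sunbird/sunbird-ml-workbench | src/main/python/daggit/contrib/sunbird/operators/contentTaggingUtils.py | WordtoPhraseMatch
-- ===== SOURCE A (Python) =====
-- def WordtoPhraseMatch(wordlist, phraselist, DELIMITTER):
--     phrasewords = [item.split(DELIMITTER) for item in phraselist]
--     match_count = 0
--     partial_match_list = []
--     wordlist_dynamic = wordlist[:]
--     for items in phrasewords:
--         word_count = 0
--         wordlist = wordlist_dynamic[:]
--         for word in wordlist:
--             if word in items:
--                 word_count += 1
--                 partial_match_list.append((word, DELIMITTER.join(items)))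
--                 wordlist_dynamic.remove(word)
--         match_count += int(bool(word_count))
--     return partial_match_list, match_count
-- ===== SOURCE B (Python) =====
-- def WordtoPhraseMatch(wordlist, phraselist, DELIMITTER):
--     phrasewords = [item.split(DELIMITTER) for item in phraselist]
--     # first phrase index containing each distinct word
--     first = {}
--     for i, items in enumerate(phrasewords):
--         for w in items:
--             if w not in first:
--                 first[w] = i
--     # bucket each wordlist occurrence (in original order) under its first phrase
--     buckets = [[] for _ in phrasewords]
--     for w in wordlist:
--         if w in first:
--             buckets[first[w]].append(w)
--     partial_match_list = []
--     match_count = 0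
--     for i, items in enumerate(phrasewords):
--         joined = DELIMITTER.join(items)
--         for w in buckets[i]:
--             partial_match_list.append((w, joined))
--         match_count += int(bool(buckets[i]))
--     return partial_match_list, match_count
-- ===== Notes on version B (the rewrite author's own statement) =====
-- stated objective: faster
-- what changed: Instead of rescanning and mutating a shrinking dynamic word list per phrase, B builds a word->first-phrase-index dict in one pass over the phrases, buckets each wordlist occurrence under its first matching phrase in one pass over the words, then emits the buckets phrase by phrase.
import Mathlib
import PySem

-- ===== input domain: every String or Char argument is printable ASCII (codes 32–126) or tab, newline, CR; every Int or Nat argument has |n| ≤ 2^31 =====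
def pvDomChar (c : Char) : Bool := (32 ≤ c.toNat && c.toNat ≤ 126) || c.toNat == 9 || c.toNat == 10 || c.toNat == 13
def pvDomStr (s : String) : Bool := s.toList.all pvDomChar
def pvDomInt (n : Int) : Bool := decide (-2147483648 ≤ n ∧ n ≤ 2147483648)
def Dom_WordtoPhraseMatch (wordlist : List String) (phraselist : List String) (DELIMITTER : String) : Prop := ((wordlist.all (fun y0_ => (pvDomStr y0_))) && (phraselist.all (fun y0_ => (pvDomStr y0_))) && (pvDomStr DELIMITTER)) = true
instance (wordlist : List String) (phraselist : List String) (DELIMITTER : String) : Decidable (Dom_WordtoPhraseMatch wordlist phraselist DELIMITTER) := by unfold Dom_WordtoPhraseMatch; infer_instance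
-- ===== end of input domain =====

-- B replaces A's per-phrase rescans of a mutated dynamic word list by a first-phrase-index
-- dict plus one bucketing pass over the words (objective: faster).

-- ===== PORT A =====
-- wordlist_dynamic.remove(word): first-occurrence removal; in A the removed word is always
-- present, so the (unreachable) none branch returns the list unchanged.
def pvARemove (dyn : List String) (w : String) : List String :=
  match PySem.List.remove? dyn w with
  | some l => l
  | none => dyn

-- body of A's inner 'for word in wordlist' loop; state = (word_count, partial_match_list, wordlist_dynamic)
def pvAInnerStep (D : String) (items : List String)
    (s : Int × List (String × String) × List String) (word : String) :
    Int × List (String × String) × List String :=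
  if word ∈ items then
    (s.1 + 1, s.2.1 ++ [(word, PySem.Str.join D items)], pvARemove s.2.2 word)
  else s

-- body of A's outer 'for items in phrasewords' loop; state = (match_count, partial_match_list, wordlist_dynamic)
def pvAStep (D : String) (st : Int × List (String × String) × List String)
    (items : List String) : Int × List (String × String) × List String :=
  let inner := st.2.2.foldl (pvAInnerStep D items) (0, st.2.1, st.2.2)
  (st.1 + (if inner.1 ≠ 0 then 1 else 0), inner.2.1, inner.2.2)

def WordtoPhraseMatch (wordlist : List String) (phraselist : List String) (DELIMITTER : String) :
    (List (String × String)) × Int :=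
  -- item.split(DELIMITTER): split? is none only for DELIMITTER = "", where Python raises (outside Pre_)
  let phrasewords := phraselist.map (fun item => (PySem.Str.split? item DELIMITTER).getD [])
  let r := phrasewords.foldl (pvAStep DELIMITTER) (0, [], wordlist)
  (r.2.1, r.1)

-- ===== PORT B =====
-- buckets[i].append(w): index i is always a valid bucket index in Source B
def pvBAppendAt : List (List String) → Nat → String → List (List String)
  | [], _, _ => []
  | b :: bs, 0, w => (b ++ [w]) :: bs
  | b :: bs, Nat.succ n, w => b :: pvBAppendAt bs n w

def WordtoPhraseMatch_alt (wordlist : List String) (phraselist : List String) (DELIMITTER : String) :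
    (List (String × String)) × Int :=
  let phrasewords := phraselist.map (fun item => (PySem.Str.split? item DELIMITTER).getD [])
  -- first: dict word -> index of the first phrase containing it
  let first : PySem.Dict String Int :=
    (PySem.List.enumerate phrasewords 0).foldl
      (fun d p => p.2.foldl (fun d w => if d.contains w then d else d.insert w p.1) d)
      PySem.Dict.empty
  -- bucket each wordlist occurrence under its first phrase (i is a nonnegative list index)
  let buckets : List (List String) :=
    wordlist.foldl
      (fun bs w =>
        match first.get? w with
        | some i => pvBAppendAt bs i.toNat w
        | none => bs)
      (phrasewords.map (fun _ => []))
  -- emit buckets phrase by phrase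
  (PySem.List.enumerate phrasewords 0).foldl
    (fun (st : List (String × String) × Int) p =>
      let joined := PySem.Str.join DELIMITTER p.2
      let bucket := buckets.getD p.1.toNat []
      (bucket.foldl (fun acc w => acc ++ [(w, joined)]) st.1,
       st.2 + (if bucket.isEmpty then 0 else 1)))
    ([], 0)

-- ===== PRECONDITION & SPEC =====
-- Python's str.split raises ValueError on an empty separator, so A (and B) raise whenever
-- DELIMITTER = "" and phraselist is nonempty; those inputs are excluded.
def Pre_WordtoPhraseMatch (wordlist : List String) (phraselist : List String) (DELIMITTER : String) : Prop :=
  DELIMITTER ≠ "" ∨ phraselist = []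

instance (wordlist : List String) (phraselist : List String) (DELIMITTER : String) :
    Decidable (Pre_WordtoPhraseMatch wordlist phraselist DELIMITTER) := by
  unfold Pre_WordtoPhraseMatch; infer_instance

def pvWitness_WordtoPhraseMatch : List String × List String × String :=
  (["a", "b", "a"], ["a b", "c"], " ")

def Spec_WordtoPhraseMatch (wordlist : List String) (phraselist : List String) (DELIMITTER : String)
    (out : (List (String × String)) × Int) : Prop :=
  out = WordtoPhraseMatch_alt wordlist phraselist DELIMITTER

instance (wordlist : List String) (phraselist : List String) (DELIMITTER : String)
    (out : (List (String × String)) × Int) :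
    Decidable (Spec_WordtoPhraseMatch wordlist phraselist DELIMITTER out) := by
  unfold Spec_WordtoPhraseMatch; infer_instance

-- ===== CLAIM (what is proved, stated in full; the proofs are below) =====
def Claim_equal_WordtoPhraseMatch : Prop :=
  ∀ (wordlist : List String) (phraselist : List String) (DELIMITTER : String),
    Dom_WordtoPhraseMatch wordlist phraselist DELIMITTER →
    Pre_WordtoPhraseMatch wordlist phraselist DELIMITTER →
    Spec_WordtoPhraseMatch wordlist phraselist DELIMITTER
      (WordtoPhraseMatch wordlist phraselist DELIMITTER)

-- ===== LEMMAS AND PROOFS =====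

-- common normal form: process phrases left to right, each phrase takes (and removes)
-- every remaining word occurrence it contains
def pvSpec (D : String) : List (List String) → List String → List (String × String) × Int
  | [], _ => ([], 0)
  | items :: rest, wl =>
    let matched := wl.filter (fun w => decide (w ∈ items))
    let r := pvSpec D rest (wl.filter (fun w => !decide (w ∈ items)))
    (matched.map (fun w => (w, PySem.Str.join D items)) ++ r.1,
     (if matched.isEmpty then 0 else 1) + r.2)

-- index of the first phrase whose word list contains w
def pvFirstIdx (pws : List (List String)) (w : String) : Option Nat :=
  pws.findIdx? (fun items => decide (w ∈ items))

-- emit form: output of the buckets g j, g (j+1), … against the phrases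
def pvEmit (D : String) (g : Nat → List String) : List (List String) → Nat → List (String × String) × Int
  | [], _ => ([], 0)
  | items :: rest, j =>
    let b := g j
    let r := pvEmit D g rest (j + 1)
    (b.map (fun w => (w, PySem.Str.join D items)) ++ r.1,
     (if b.isEmpty then 0 else 1) + r.2)

theorem pv_remove_append (w : String) (pre ws : List String) (h : w ∉ pre) :
    pvARemove (pre ++ w :: ws) w = pre ++ ws := by
  have key : PySem.List.remove? (pre ++ w :: ws) w = some (pre ++ ws) := by
    induction pre with
    | nil => simp [PySem.List.remove?_cons_self]
    | cons x xs ih =>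
      have hx : x ≠ w := fun e => h (by simp [e])
      rw [List.cons_append, PySem.List.remove?_cons_of_ne _ hx,
          ih (fun m => h (List.mem_cons_of_mem _ m))]
      rfl
  simp [pvARemove, key]

theorem pvA_inner (D : String) (items : List String) :
    ∀ (ws pre : List String), (∀ x ∈ pre, x ∉ items) →
    ∀ (wc : Int) (pml : List (String × String)),
    ws.foldl (pvAInnerStep D items) (wc, pml, pre ++ ws)
      = (wc + ((ws.filter (fun w => decide (w ∈ items))).length : Int),
         pml ++ (ws.filter (fun w => decide (w ∈ items))).map (fun w => (w, PySem.Str.join D items)),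
         pre ++ ws.filter (fun w => !decide (w ∈ items))) := by
  intro ws
  induction ws with
  | nil => intro pre _ wc pml; simp
  | cons w ws ih =>
    intro pre hpre wc pml
    by_cases hw : w ∈ items
    · have hwp : w ∉ pre := fun m => hpre w m hw
      rw [List.foldl_cons]
      have : pvAInnerStep D items (wc, pml, pre ++ w :: ws) w
          = (wc + 1, pml ++ [(w, PySem.Str.join D items)], pre ++ ws) := by
        simp [pvAInnerStep, hw, pv_remove_append w pre ws hwp]
      rw [this, ih pre hpre]
      simp [hw]
      ring
    · rw [List.foldl_cons]
      have hst : pvAInnerStep D items (wc, pml, pre ++ w :: ws) w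
          = (wc, pml, (pre ++ [w]) ++ ws) := by
        simp [pvAInnerStep, hw]
      have hpre' : ∀ x ∈ pre ++ [w], x ∉ items := by
        intro x hx
        rcases List.mem_append.1 hx with h1 | h1
        · exact hpre x h1
        · simp at h1; subst h1; exact hw
      rw [hst, ih (pre ++ [w]) hpre']
      simp [hw]

theorem pvA_outer (D : String) :
    ∀ (pws : List (List String)) (wl : List String) (mc : Int) (pml : List (String × String)),
    pws.foldl (pvAStep D) (mc, pml, wl)
      = (mc + (pvSpec D pws wl).2, pml ++ (pvSpec D pws wl).1,
         (pws.foldl (pvAStep D) (mc, pml, wl)).2.2) := by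
  intro pws
  induction pws with
  | nil => intro wl mc pml; simp [pvSpec]
  | cons items rest ih =>
    intro wl mc pml
    rw [List.foldl_cons]
    have hin : wl.foldl (pvAInnerStep D items) (0, pml, wl)
        = (((wl.filter (fun w => decide (w ∈ items))).length : Int),
           pml ++ (wl.filter (fun w => decide (w ∈ items))).map (fun w => (w, PySem.Str.join D items)),
           wl.filter (fun w => !decide (w ∈ items))) := by
      have h := pvA_inner D items wl [] (by simp) 0 pml
      simpa using h
    have hstep : pvAStep D (mc, pml, wl) items
        = (mc + (if (wl.filter (fun w => decide (w ∈ items))).isEmpty then 0 else 1),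
           pml ++ (wl.filter (fun w => decide (w ∈ items))).map (fun w => (w, PySem.Str.join D items)),
           wl.filter (fun w => !decide (w ∈ items))) := by
      simp only [pvAStep, hin]
      rcases h : wl.filter (fun w => decide (w ∈ items)) with _ | ⟨a, l⟩
      · simp
      · simp
        omega
    rw [hstep, ih]
    simp [pvSpec, add_assoc]

-- A equals the normal form
theorem pvA_eq_spec (wl pl : List String) (D : String) :
    WordtoPhraseMatch wl pl D
      = ((pvSpec D (pl.map (fun item => (PySem.Str.split? item D).getD [])) wl).1,
         (pvSpec D (pl.map (fun item => (PySem.Str.split? item D).getD [])) wl).2) := by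
  simp only [WordtoPhraseMatch]
  rw [pvA_outer]
  simp

-- B-side: the insert-if-absent inner fold over one phrase
theorem pvB_first_inner (v : Int) (items : List String) :
    ∀ (d : PySem.Dict String Int) (x : String),
    (items.foldl (fun d w => if d.contains w then d else d.insert w v) d).get? x
      = (d.get? x).or (if x ∈ items then some v else none) := by
  induction items with
  | nil => intro d x; cases h : d.get? x <;> simp [h]
  | cons y ys ih =>
    intro d x
    rw [List.foldl_cons]
    by_cases hc : d.contains y
    · rw [if_pos hc, ih]
      by_cases hxy : x = y
      · subst hxy
        have : (d.get? x).isSome := by rw [← PySem.Dict.contains_eq_isSome_get?]; exact hc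
        cases h : d.get? x with
        | none => rw [h] at this; simp at this
        | some w => simp
      · simp [List.mem_cons, hxy]
    · rw [if_neg hc, ih]
      by_cases hxy : x = y
      · subst hxy
        have hd : d.get? x = none := by
          rw [PySem.Dict.get?_eq_none_iff_contains]; simpa using hc
        rw [PySem.Dict.get?_insert, if_pos rfl, hd]
        simp
      · rw [PySem.Dict.get?_insert, if_neg hxy]
        simp [List.mem_cons, hxy]

-- the dict after the whole build fold holds each word's first phrase index
theorem pvB_first (pws : List (List String)) :
    ∀ (n : Nat) (d : PySem.Dict String Int) (x : String),
    ((PySem.List.enumerate pws (n : Int)).foldl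
        (fun d p => p.2.foldl (fun d w => if d.contains w then d else d.insert w p.1) d) d).get? x
      = (d.get? x).or ((pvFirstIdx pws x).map (fun i => ((n + i : Nat) : Int))) := by
  induction pws with
  | nil =>
    intro n d x
    simp [PySem.List.enumerate_nil, pvFirstIdx]
  | cons items rest ih =>
    intro n d x
    rw [PySem.List.enumerate_cons, List.foldl_cons]
    have : ((n : Int) + 1) = ((n + 1 : Nat) : Int) := by push_cast; ring
    rw [this, ih (n + 1), pvB_first_inner]
    simp only [pvFirstIdx, List.findIdx?_cons]
    by_cases hx : x ∈ items
    · simp [hx]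
    · simp only [hx, decide_false, Bool.false_eq_true, if_false]
      cases h : d.get? x with
      | some w => simp
      | none =>
        simp only [Option.none_or]
        cases hr : rest.findIdx? (fun items => decide (x ∈ items)) with
        | none => simp
        | some i => simp; ring

theorem pvBAppendAt_length (bs : List (List String)) :
    ∀ (i : Nat) (w : String), (pvBAppendAt bs i w).length = bs.length := by
  induction bs with
  | nil => intro i w; rfl
  | cons b bs ih => intro i w; cases i <;> simp [pvBAppendAt, ih]

theorem getD_pvBAppendAt (bs : List (List String)) :
    ∀ (i j : Nat) (w : String), i < bs.length →
    (pvBAppendAt bs i w).getD j [] = if i = j then bs.getD j [] ++ [w] else bs.getD j [] := by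
  induction bs with
  | nil => intro i j w h; simp at h
  | cons b bs ih =>
    intro i j w h
    cases i with
    | zero =>
      cases j with
      | zero => simp [pvBAppendAt, List.getD]
      | succ m => simp [pvBAppendAt, List.getD]
    | succ n =>
      cases j with
      | zero => simp [pvBAppendAt, List.getD]
      | succ m =>
        simp only [pvBAppendAt, List.getD_cons_succ]
        rw [ih n m w (by simpa using h)]
        by_cases hnm : n = m <;> simp [hnm]

theorem pv_findIdx_lt {pws : List (List String)} {x : String} {i : Nat}
    (h : pvFirstIdx pws x = some i) : i < pws.length := by
  simpa using (List.findIdx?_eq_some_iff_findIdx_eq.1 h).1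

-- the buckets fold groups the word occurrences by their first phrase index
theorem pvB_buckets (pws : List (List String)) (wl : List String) :
    ∀ (bs : List (List String)), bs.length = pws.length →
    ∀ (j : Nat),
    (wl.foldl (fun bs w =>
        match (Option.map (fun (i : Nat) => (i : Int)) (pvFirstIdx pws w)) with
        | some i => pvBAppendAt bs i.toNat w
        | none => bs) bs).getD j []
      = bs.getD j [] ++ wl.filter (fun w => pvFirstIdx pws w = some j) := by
  induction wl with
  | nil => intro bs _ j; simp
  | cons w ws ih =>
    intro bs hb j
    rw [List.foldl_cons]
    cases hf : pvFirstIdx pws w with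
    | none =>
      simp only [Option.map_none]
      rw [ih bs hb, List.filter_cons]
      simp [hf]
    | some i =>
      have hi : i < bs.length := hb ▸ pv_findIdx_lt hf
      simp only [Option.map_some, Int.toNat_natCast]
      rw [ih (pvBAppendAt bs i w) (by rw [pvBAppendAt_length]; exact hb),
          getD_pvBAppendAt bs i j w hi, List.filter_cons]
      by_cases hij : i = j
      · subst hij; simp [hf]
      · simp [hf, hij]

-- l.foldl (acc ++ [f x]) = acc ++ l.map f
theorem pv_foldl_append_map {α β : Type} (f : α → β) :
    ∀ (l : List α) (acc : List β), l.foldl (fun a x => a ++ [f x]) acc = acc ++ l.map f := by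
  intro l
  induction l with
  | nil => intro acc; simp
  | cons x xs ih => intro acc; rw [List.foldl_cons, ih]; simp

-- B's emit fold equals pvEmit over the bucket function
theorem pvB_emit (D : String) (buckets : List (List String)) :
    ∀ (pws : List (List String)) (n : Nat) (a1 : List (String × String)) (a2 : Int),
    (PySem.List.enumerate pws (n : Int)).foldl
        (fun (st : List (String × String) × Int) p =>
          (( buckets.getD p.1.toNat []).foldl (fun acc w => acc ++ [(w, PySem.Str.join D p.2)]) st.1,
           st.2 + (if (buckets.getD p.1.toNat []).isEmpty then 0 else 1)))
        (a1, a2)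
      = (a1 ++ (pvEmit D (fun j => buckets.getD j []) pws n).1,
         a2 + (pvEmit D (fun j => buckets.getD j []) pws n).2) := by
  intro pws
  induction pws with
  | nil => intro n a1 a2; simp [PySem.List.enumerate_nil, pvEmit]
  | cons items rest ih =>
    intro n a1 a2
    rw [PySem.List.enumerate_cons, List.foldl_cons]
    have hcast : ((n : Int) + 1) = ((n + 1 : Nat) : Int) := by push_cast; ring
    simp only [Int.toNat_natCast]
    rw [hcast, ih (n + 1), pv_foldl_append_map]
    simp only [pvEmit, Prod.mk.injEq]
    refine ⟨by simp, by ring⟩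

-- shifting pvEmit's index is reindexing its bucket function
theorem pvEmit_shift (D : String) (g : Nat → List String) :
    ∀ (l : List (List String)) (j : Nat),
    pvEmit D g l (j + 1) = pvEmit D (fun k => g (k + 1)) l j := by
  intro l
  induction l with
  | nil => intro j; rfl
  | cons items rest ih => intro j; simp only [pvEmit]; rw [ih]

-- the normal form in emit form over the first-index buckets
theorem pvSpec_eq_emit (D : String) :
    ∀ (pws : List (List String)) (wl : List String),
    pvSpec D pws wl
      = pvEmit D (fun j => wl.filter (fun w => pvFirstIdx pws w = some j)) pws 0 := by
  intro pws
  induction pws with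
  | nil => intro wl; rfl
  | cons items rest ih =>
    intro wl
    simp only [pvSpec, pvEmit, pvEmit_shift]
    have h0 : wl.filter (fun w => pvFirstIdx (items :: rest) w = some 0)
        = wl.filter (fun w => decide (w ∈ items)) := by
      apply List.filter_congr
      intro w _
      simp only [pvFirstIdx, List.findIdx?_cons]
      by_cases hw : w ∈ items <;> simp [hw]
    have h1 : ∀ k : Nat,
        (wl.filter (fun w => !decide (w ∈ items))).filter (fun w => pvFirstIdx rest w = some k)
          = wl.filter (fun w => pvFirstIdx (items :: rest) w = some (k + 1)) := by
      intro k
      rw [List.filter_filter]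
      apply List.filter_congr
      intro w _
      simp only [pvFirstIdx, List.findIdx?_cons]
      by_cases hw : w ∈ items
      · simp [hw]
      · simp only [hw, decide_false, Bool.false_eq_true, if_false, Bool.not_false,
          Bool.and_true, decide_eq_decide]
        cases hr : rest.findIdx? (fun items => decide (w ∈ items)) with
        | none => simp
        | some i => simp
    rw [ih]
    simp only [h0]
    have hg : (fun k => (wl.filter (fun w => !decide (w ∈ items))).filter
          (fun w => pvFirstIdx rest w = some k))
        = (fun k => wl.filter (fun w => pvFirstIdx (items :: rest) w = some (k + 1))) :=
      funext h1
    rw [hg]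

-- getD on the all-empty initial bucket list
theorem pv_getD_init (pws : List (List String)) :
    ∀ (j : Nat), (pws.map (fun _ => ([] : List String))).getD j [] = [] := by
  induction pws with
  | nil => intro j; simp
  | cons _ rest ih =>
    intro j
    cases j with
    | zero => rfl
    | succ m => exact ih m

-- B equals the normal form
theorem pvB_eq_spec (wl pl : List String) (D : String) :
    WordtoPhraseMatch_alt wl pl D
      = ((pvSpec D (pl.map (fun item => (PySem.Str.split? item D).getD [])) wl).1,
         (pvSpec D (pl.map (fun item => (PySem.Str.split? item D).getD [])) wl).2) := by
  simp only [WordtoPhraseMatch_alt]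
  set pws := pl.map (fun item => (PySem.Str.split? item D).getD []) with hpws
  -- the dict lookup computes pvFirstIdx
  have hfirst : ∀ x : String,
      ((PySem.List.enumerate pws 0).foldl
        (fun d p => p.2.foldl (fun d w => if d.contains w then d else d.insert w p.1) d)
        PySem.Dict.empty).get? x
      = Option.map (fun (i : Nat) => (i : Int)) (pvFirstIdx pws x) := by
    intro x
    rw [show (0 : Int) = ((0 : Nat) : Int) from rfl, pvB_first pws 0 PySem.Dict.empty x]
    cases hfi : pvFirstIdx pws x <;> simp [PySem.Dict.get?_empty]
  -- the bucket fold uses that lookup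
  have hfun : (fun (bs : List (List String)) (w : String) =>
        match ((PySem.List.enumerate pws 0).foldl
          (fun d p => p.2.foldl (fun d w => if d.contains w then d else d.insert w p.1) d)
          PySem.Dict.empty).get? w with
        | some i => pvBAppendAt bs i.toNat w
        | none => bs)
      = (fun bs w =>
        match (Option.map (fun (i : Nat) => (i : Int)) (pvFirstIdx pws w)) with
        | some i => pvBAppendAt bs i.toNat w
        | none => bs) := by
    funext bs w; rw [hfirst w]
  rw [hfun]
  set bks := wl.foldl (fun bs w =>
      match (Option.map (fun (i : Nat) => (i : Int)) (pvFirstIdx pws w)) with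
      | some i => pvBAppendAt bs i.toNat w
      | none => bs) (pws.map (fun _ => [])) with hbks
  have hemit := pvB_emit D bks pws 0 [] 0
  simp only [Nat.cast_zero] at hemit
  rw [hemit]
  have hg : (fun j => bks.getD j []) = (fun j => wl.filter (fun w => pvFirstIdx pws w = some j)) := by
    funext j
    rw [hbks, pvB_buckets pws wl _ (by simp), pv_getD_init]
    simp
  rw [hg, ← pvSpec_eq_emit]
  simp

-- ===== VERDICT (by name: the statement is the Claim_ definition above) =====
theorem WordtoPhraseMatch_spec : Claim_equal_WordtoPhraseMatch := by
  intro wl pl D _ _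
  unfold Spec_WordtoPhraseMatch
  rw [pvA_eq_spec, pvB_eq_spec]
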